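-- pv_equiv track=rewrite | github.com/Bayer-Group/PhenEx | phenex/util/output_concatenator.py | _insert_binned_spacers
-- ===== SOURCE A (Python) =====
-- from typing import Dict, List, Optional, Tuple
--
-- def _insert_binned_spacers(
--     expanded: List[Tuple[str, str]],
--     name_to_level: Dict[str, int],
-- ) -> List[Tuple[str, str]]:
--     """Insert a spacer row before each group of binned rows.
--
--     A spacer is not inserted if the binned group is the first data row
--     or immediately follows a section header.
--     """
--     result: List[Tuple[str, str]] = []
--     for i, (row_type, value) in enumerate(expanded):
--         if row_type == "row" and "=" in value and name_to_level.get(value, 0) == 0: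
--             prev_type = result[-1][0] if result else None
--             prev_is_binned = (
--                 (
--                     prev_type == "row"
--                     and "=" in result[-1][1]
--                     and name_to_level.get(result[-1][1], 0) == 0
--                 )
--                 if result
--                 else False
--             )
--             if not prev_is_binned and prev_type not in (None, "section"):
--                 result.append(("spacer", ""))
--         result.append((row_type, value))
--     return result
-- ===== SOURCE B (Python) =====
-- def _insert_binned_spacers(expanded, name_to_level):
--     """Run-segmentation version: first split the input into maximal runs of
--     rows with equal 'binned' status, then join the runs, inserting a spacer
--     before every binned run that follows a run not ending in a section header."""
--     def binned(p):
--         rt, v = p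
--         return rt == "row" and "=" in v and name_to_level.get(v, 0) == 0
--
--     runs = []  # list of (flag, [rows...]) maximal groups
--     for p in expanded:
--         b = binned(p)
--         if runs and runs[-1][0] == b:
--             runs[-1][1].append(p)
--         else:
--             runs.append((b, [p]))
--
--     out = []
--     prev_last = None
--     for b, run in runs:
--         if b and prev_last is not None and prev_last[0] != "section":
--             out.append(("spacer", ""))
--         out.extend(run)
--         prev_last = run[-1]
--     return out
-- ===== Notes on version B (the rewrite author's own statement) =====
-- stated objective: alternative
-- what changed: B first segments the input into maximal runs of equal binned status (a groupby pass) and then joins the runs, emitting one spacer per binned run, instead of A's element-wise pass that re-inspects the already-built output tail (result[-1]) for every row.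
import Mathlib
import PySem

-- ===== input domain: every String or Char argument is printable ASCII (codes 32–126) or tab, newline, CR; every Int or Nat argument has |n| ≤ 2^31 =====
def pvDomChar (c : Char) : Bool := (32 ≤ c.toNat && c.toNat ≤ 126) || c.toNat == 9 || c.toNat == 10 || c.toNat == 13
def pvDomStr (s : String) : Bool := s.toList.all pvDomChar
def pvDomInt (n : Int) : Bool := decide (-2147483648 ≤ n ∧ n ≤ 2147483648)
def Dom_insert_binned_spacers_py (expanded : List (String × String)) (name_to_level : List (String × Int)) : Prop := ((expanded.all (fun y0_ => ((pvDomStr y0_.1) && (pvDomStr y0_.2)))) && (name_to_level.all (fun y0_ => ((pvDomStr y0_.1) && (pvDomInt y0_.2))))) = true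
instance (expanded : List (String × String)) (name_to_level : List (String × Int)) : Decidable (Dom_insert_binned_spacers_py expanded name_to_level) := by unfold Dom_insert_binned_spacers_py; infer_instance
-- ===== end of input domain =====

-- B segments the input into maximal runs of equal binned status and joins the runs with one
-- spacer per binned run, instead of A's per-element pass inspecting the output tail; same cost.


-- ===== PORT A =====
-- A's loop body: check the current row's binned condition, then inspect result[-1].
def pvAStep (name_to_level : List (String × Int)) (result : List (String × String)) (x : String × String) : List (String × String) :=
  if x.1 == "row" && PySem.Str.isIn "=" x.2 && ((PySem.Dict.mk name_to_level).getD x.2 0 == 0) then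
    let prev? := result.getLast?
    let prevIsBinned : Bool :=
      match prev? with
      | some p => p.1 == "row" && PySem.Str.isIn "=" p.2 && ((PySem.Dict.mk name_to_level).getD p.2 0 == 0)
      | none => false
    let result :=
      if !prevIsBinned && (match prev? with
        | none => false          -- prev_type is None: no spacer
        | some p => p.1 != "section") then result ++ [("spacer", "")] else result
    result ++ [x]
  else result ++ [x]

def insert_binned_spacers_py (expanded : List (String × String)) (name_to_level : List (String × Int)) : List (String × String) :=
  expanded.foldl (pvAStep name_to_level) []

-- ===== PORT B =====
-- binned flag of one row (B's helper `binned`)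
def pvBinned (name_to_level : List (String × Int)) (p : String × String) : Bool :=
  p.1 == "row" && PySem.Str.isIn "=" p.2 && ((PySem.Dict.mk name_to_level).getD p.2 0 == 0)

-- B's first loop: extend the last run or start a new one (runs[-1][1].append ported persistently)
def pvRunsStep (name_to_level : List (String × Int))
    (runs : List (Bool × List (String × String))) (p : String × String) :
    List (Bool × List (String × String)) :=
  let b := pvBinned name_to_level p
  match runs.getLast? with
  | some r => if r.1 == b then runs.dropLast ++ [(r.1, r.2 ++ [p])] else runs ++ [(b, [p])]
  | none => [(b, [p])]

-- B's second loop over one run, state = (out, prev_last)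
def pvJoinStep (st : List (String × String) × Option (String × String))
    (r : Bool × List (String × String)) :
    List (String × String) × Option (String × String) :=
  let out := if r.1 && (match st.2 with | some p => p.1 != "section" | none => false)
             then st.1 ++ [("spacer", "")] else st.1
  (out ++ r.2, r.2.getLast?)

def insert_binned_spacers_py_alt (expanded : List (String × String)) (name_to_level : List (String × Int)) : List (String × String) :=
  ((expanded.foldl (pvRunsStep name_to_level) []).foldl pvJoinStep ([], none)).1

-- ===== PRECONDITION & SPEC =====
def Spec_insert_binned_spacers_py (expanded : List (String × String)) (name_to_level : List (String × Int)) (out : List (String × String)) : Prop := out = insert_binned_spacers_py_alt expanded name_to_level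
instance (expanded : List (String × String)) (name_to_level : List (String × Int)) (out : List (String × String)) : Decidable (Spec_insert_binned_spacers_py expanded name_to_level out) := by unfold Spec_insert_binned_spacers_py; infer_instance

-- ===== CLAIM (what is proved, stated in full; the proofs are below) =====
def Claim_equal_insert_binned_spacers_py : Prop := ∀ (expanded : List (String × String)) (name_to_level : List (String × Int)), Dom_insert_binned_spacers_py expanded name_to_level → Spec_insert_binned_spacers_py expanded name_to_level (insert_binned_spacers_py expanded name_to_level)

-- ===== LEMMAS AND PROOFS =====

-- reference predicate: a spacer goes before x iff x is binned and prev exists, is not binned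
-- and is not a section header
def pvCond (ntl : List (String × Int)) : Option (String × String) → Bool
  | none => false
  | some p => !(pvBinned ntl p) && (p.1 != "section")

-- reference function both ports are reduced to
def pvRef (ntl : List (String × Int)) : Option (String × String) → List (String × String) → List (String × String)
  | _, [] => []
  | prev, x :: xs =>
      (if pvBinned ntl x && pvCond ntl prev then [(("spacer" : String), ("" : String))] else [])
        ++ x :: pvRef ntl (some x) xs

def pvLastOr (prev : Option (String × String)) (xs : List (String × String)) : Option (String × String) :=
  match xs.getLast? with
  | some l => some l
  | none => prev

theorem pvAStep_eq (ntl : List (String × Int)) (acc : List (String × String)) (x : String × String) :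
    pvAStep ntl acc x
      = acc ++ (if pvBinned ntl x && pvCond ntl acc.getLast? then [(("spacer" : String), ("" : String))] else []) ++ [x] := by
  cases h : acc.getLast? with
  | none => simp [pvAStep, pvCond, pvBinned, h]
  | some p =>
    simp only [pvAStep, pvCond, pvBinned, h]
    split_ifs <;> simp_all

theorem pvA_ref (ntl : List (String × Int)) :
    ∀ (xs : List (String × String)) (acc : List (String × String)),
      xs.foldl (pvAStep ntl) acc = acc ++ pvRef ntl acc.getLast? xs := by
  intro xs
  induction xs with
  | nil => intro acc; simp [pvRef]
  | cons x xs ih =>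
    intro acc
    rw [List.foldl_cons, ih, pvAStep_eq]
    have hl : (acc ++ (if pvBinned ntl x && pvCond ntl acc.getLast? then [(("spacer" : String), ("" : String))] else []) ++ [x]).getLast? = some x := by
      simp
    rw [hl]
    simp [pvRef]

theorem pvRef_append (ntl : List (String × Int)) (xs : List (String × String))
    (prev : Option (String × String)) (x : String × String) :
    pvRef ntl prev (xs ++ [x])
      = pvRef ntl prev xs
        ++ (if pvBinned ntl x && pvCond ntl (pvLastOr prev xs) then [(("spacer" : String), ("" : String))] else [])
        ++ [x] := by
  induction xs generalizing prev with
  | nil => simp [pvRef, pvLastOr]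
  | cons y ys ih =>
    simp only [List.cons_append, pvRef, ih (some y)]
    have : pvLastOr prev (y :: ys) = pvLastOr (some y) ys := by
      cases ys with
      | nil => simp [pvLastOr]
      | cons z zs =>
        simp only [pvLastOr, List.getLast?_cons_cons]
        cases h : (z :: zs).getLast? with
        | none => exact absurd (List.getLast?_eq_none_iff.mp h) (by simp)
        | some l => rfl
    rw [this]
    simp

theorem pvJoinStep_append (st : List (String × String) × Option (String × String))
    (f : Bool) (run : List (String × String)) (p : String × String) :
    pvJoinStep st (f, run ++ [p]) = ((pvJoinStep st (f, run)).1 ++ [p], some p) := by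
  simp [pvJoinStep]

-- main invariant: joining the runs of xs yields pvRef, prev_last tracks xs's last element,
-- and the last run ends with xs's last element and carries its flag
theorem pvB_inv (ntl : List (String × Int)) (xs : List (String × String)) :
    (xs.foldl (pvRunsStep ntl) []).foldl pvJoinStep ([], none) = (pvRef ntl none xs, xs.getLast?)
    ∧ (∀ L, xs.getLast? = some L →
        ∃ rs run, xs.foldl (pvRunsStep ntl) [] = rs ++ [(pvBinned ntl L, run)] ∧ run.getLast? = some L) := by
  induction xs using List.reverseRecOn with
  | nil => exact ⟨by simp [pvRef], by simp⟩
  | append_singleton xs x ih =>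
    obtain ⟨hJ, hLast⟩ := ih
    rw [List.foldl_append]
    simp only [List.foldl_cons, List.foldl_nil]
    cases hxs : xs.getLast? with
    | none =>
      have hxe : xs = [] := List.getLast?_eq_none_iff.mp hxs
      subst hxe
      constructor
      · simp [pvRunsStep, pvJoinStep, pvRef, pvCond]
      · intro L hL
        simp at hL
        subst hL
        exact ⟨[], [x], by simp [pvRunsStep], by simp⟩
    | some L =>
      obtain ⟨rs, run, hruns, hrunL⟩ := hLast L hxs
      have hrunsLast : (xs.foldl (pvRunsStep ntl) []).getLast? = some (pvBinned ntl L, run) := by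
        rw [hruns]; simp
      have hrefapp := pvRef_append ntl xs none x
      have hlo : pvLastOr none xs = some L := by simp [pvLastOr, hxs]
      rw [hlo] at hrefapp
      by_cases hb : pvBinned ntl L = pvBinned ntl x
      · -- same flag: extend the last run; no spacer in pvRef either
        have hstep : pvRunsStep ntl (xs.foldl (pvRunsStep ntl) []) x
            = rs ++ [(pvBinned ntl L, run ++ [x])] := by
          simp [pvRunsStep, hb, hruns]
        have hcond : (pvBinned ntl x && pvCond ntl (some L)) = false := by
          cases hx : pvBinned ntl x <;> simp_all [pvCond]
        rw [hcond] at hrefapp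
        simp only [Bool.false_eq_true, if_false, List.append_nil] at hrefapp
        constructor
        · rw [hstep, List.foldl_append]
          have hJrs : List.foldl pvJoinStep ([], none) (rs ++ [(pvBinned ntl L, run)]) =
              (pvRef ntl none xs, xs.getLast?) := by rw [← hruns]; exact hJ
          rw [List.foldl_append] at hJrs
          simp only [List.foldl_cons, List.foldl_nil] at hJrs ⊢
          rw [pvJoinStep_append, hJrs]
          simp [hrefapp]
        · intro L' hL'
          simp at hL'
          subst hL'
          exact ⟨rs, run ++ [x], by rw [hstep, hb], by simp⟩
      · -- different flag: start a new run; spacer condition reduces to the section test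
        have hstep : pvRunsStep ntl (xs.foldl (pvRunsStep ntl) []) x
            = (xs.foldl (pvRunsStep ntl) []) ++ [(pvBinned ntl x, [x])] := by
          simp [pvRunsStep, hrunsLast]
          intro h; exact absurd h hb
        have hcond : (pvBinned ntl x && pvCond ntl (some L))
            = (pvBinned ntl x && (L.1 != "section")) := by
          cases hx : pvBinned ntl x
          · simp
          · have : pvBinned ntl L = false := by
              cases hLb : pvBinned ntl L
              · rfl
              · exact absurd (hLb.trans hx.symm) hb
            simp [pvCond, this]
        rw [hcond] at hrefapp
        constructor
        · rw [hstep, List.foldl_append, hJ]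
          simp only [List.foldl_cons, List.foldl_nil, pvJoinStep, hxs]
          rw [hrefapp]
          split_ifs <;> simp
        · intro L' hL'
          simp at hL'
          subst hL'
          exact ⟨xs.foldl (pvRunsStep ntl) [], [x], by rw [hstep], by simp⟩

-- ===== VERDICT (by name: the statement is the Claim_ definition above) =====
theorem insert_binned_spacers_py_spec : Claim_equal_insert_binned_spacers_py := by
  intro expanded ntl _
  unfold Spec_insert_binned_spacers_py insert_binned_spacers_py insert_binned_spacers_py_alt
  rw [(pvB_inv ntl expanded).1]
  have := pvA_ref ntl expanded []
  simpa using this
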